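-- pv_equiv track=rewrite | github.com/ustaslive/words | lab/crossword_repeatability/simulate_word_frequency.py | are_all_seed_letters_used
-- ===== SOURCE A (Python) =====
-- ALPHABET_START = "A"
--
-- ALPHABET_END = "Z"
--
-- ALPHABET_SIZE = 26
--
-- ORD_A = ord(ALPHABET_START)
--
-- def is_english_upper_letter(char: str) -> bool:
--     return ALPHABET_START <= char <= ALPHABET_END
--
-- def are_all_seed_letters_used(seed_letters: str, layout_words: set[str]) -> bool:
--     used_letters = [False] * ALPHABET_SIZE
--     for word in layout_words:
--         for char in word:
--             if not is_english_upper_letter(char):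
--                 continue
--             used_letters[ord(char) - ORD_A] = True
--
--     for char in seed_letters.strip().upper():
--         if not is_english_upper_letter(char):
--             return False
--         if not used_letters[ord(char) - ORD_A]:
--             return False
--     return True
-- ===== SOURCE B (Python) =====
-- def are_all_seed_letters_used(seed_letters: str, layout_words: set[str]) -> bool:
--     for char in seed_letters.strip().upper():
--         if not ("A" <= char <= "Z"):
--             return False
--         if not any(char in word for word in layout_words):
--             return False
--     return True
-- ===== Notes on version B (the rewrite author's own statement) =====
-- stated objective: simpler
-- what changed: Drops A's precomputed 26-entry used-letter table (built by a nested pass over all layout words) and instead, for each seed letter, directly scans the layout words with any(char in word ...).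
import Mathlib
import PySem

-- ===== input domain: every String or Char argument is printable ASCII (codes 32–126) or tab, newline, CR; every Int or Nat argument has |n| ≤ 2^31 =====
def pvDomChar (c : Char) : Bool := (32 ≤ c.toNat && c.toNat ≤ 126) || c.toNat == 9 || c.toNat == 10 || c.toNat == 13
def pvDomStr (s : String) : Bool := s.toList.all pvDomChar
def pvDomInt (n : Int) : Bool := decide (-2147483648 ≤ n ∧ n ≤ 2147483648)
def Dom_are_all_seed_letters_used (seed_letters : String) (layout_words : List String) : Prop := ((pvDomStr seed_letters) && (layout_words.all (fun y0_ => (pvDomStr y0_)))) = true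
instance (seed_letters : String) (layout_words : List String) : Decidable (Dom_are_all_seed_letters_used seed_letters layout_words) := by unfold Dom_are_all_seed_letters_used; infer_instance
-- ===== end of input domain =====

-- B replaces A's precomputed 26-entry used-letter table by a direct scan of the
-- layout words for each seed letter (simpler; no speed claim).

-- ===== PORT A =====
def is_english_upper_letter (c : Char) : Bool := decide ('A' ≤ c ∧ c ≤ 'Z')

-- the second loop of A, with its early returns (index is always < 26 there, so getD is exact)
def pvCheckSeed (used : List Bool) : List Char → Bool
  | [] => true
  | c :: rest =>
    if !is_english_upper_letter c then false
    else if !(used.getD (c.toNat - 65) false) then false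
    else pvCheckSeed used rest

def are_all_seed_letters_used (seed_letters : String) (layout_words : List String) : Bool :=
  let used := layout_words.foldl
    (fun u w => w.toList.foldl
      (fun u c => if !is_english_upper_letter c then u else u.set (c.toNat - 65) true) u)
    (List.replicate 26 false)
  pvCheckSeed used ((PySem.Str.upper (PySem.Str.strip seed_letters)).toList)

-- ===== PORT B =====
-- the loop of Source B with its early returns; `char in word` is PySem.Str.isIn
def pvSeedOk (layout_words : List String) : List Char → Bool
  | [] => true
  | c :: rest =>
    if !(decide ('A' ≤ c ∧ c ≤ 'Z')) then false
    else if !(layout_words.any (fun w => PySem.Str.isIn (String.ofList [c]) w)) then false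
    else pvSeedOk layout_words rest

def are_all_seed_letters_used_alt (seed_letters : String) (layout_words : List String) : Bool :=
  pvSeedOk layout_words ((PySem.Str.upper (PySem.Str.strip seed_letters)).toList)

-- ===== PRECONDITION & SPEC =====
def Spec_are_all_seed_letters_used (seed_letters : String) (layout_words : List String) (out : Bool) : Prop := out = are_all_seed_letters_used_alt seed_letters layout_words
instance (seed_letters : String) (layout_words : List String) (out : Bool) : Decidable (Spec_are_all_seed_letters_used seed_letters layout_words out) := by unfold Spec_are_all_seed_letters_used; infer_instance

-- ===== CLAIM (what is proved, stated in full; the proofs are below) =====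
def Claim_equal_are_all_seed_letters_used : Prop := ∀ (seed_letters : String) (layout_words : List String), Dom_are_all_seed_letters_used seed_letters layout_words → Spec_are_all_seed_letters_used seed_letters layout_words (are_all_seed_letters_used seed_letters layout_words)

-- ===== LEMMAS AND PROOFS =====

-- A's word-marking step preserves the table length
lemma mark_length (cs : List Char) (u : List Bool) :
    (cs.foldl (fun u c => if !is_english_upper_letter c then u else u.set (c.toNat - 65) true) u).length
      = u.length := by
  induction cs generalizing u with
  | nil => rfl
  | cons c cs ih =>
    simp only [List.foldl_cons]
    rw [ih]
    split <;> simp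

lemma mark_getD (cs : List Char) (u : List Bool) (j : Nat) (hj : j < u.length) :
    (cs.foldl (fun u c => if !is_english_upper_letter c then u else u.set (c.toNat - 65) true) u).getD j false
      = (u.getD j false || cs.any (fun c => is_english_upper_letter c && (c.toNat - 65 == j))) := by
  induction cs generalizing u with
  | nil => simp
  | cons c cs ih =>
    simp only [List.foldl_cons, List.any_cons]
    by_cases hc : is_english_upper_letter c = true
    · simp only [hc, Bool.not_true, Bool.false_eq_true, if_false, Bool.true_and]
      rw [ih _ (by simpa using hj)]
      by_cases hij : c.toNat - 65 = j
      · subst hij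
        simp [List.getD_eq_getElem?_getD, List.getElem?_set_self hj]
      · have hb : (c.toNat - 65 == j) = false := by simpa using hij
        simp [List.getD_eq_getElem?_getD, List.getElem?_set_ne hij, hb]
    · simp only [hc, Bool.not_false, if_true, Bool.false_and, Bool.false_or]
      exact ih _ hj

lemma marks_getD (ws : List String) (u : List Bool) (j : Nat) (hj : j < u.length) :
    (ws.foldl (fun u w => w.toList.foldl
        (fun u c => if !is_english_upper_letter c then u else u.set (c.toNat - 65) true) u) u).getD j false
      = (u.getD j false || ws.any (fun w => w.toList.any (fun c => is_english_upper_letter c && (c.toNat - 65 == j)))) := by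
  induction ws generalizing u with
  | nil => simp
  | cons w ws ih =>
    simp only [List.foldl_cons, List.any_cons]
    rw [ih _ (by rw [mark_length]; exact hj), mark_getD _ _ j hj, Bool.or_assoc]

-- for an uppercase letter c, the table bit at c.toNat-65 says exactly "c occurs in some word"
lemma bit_eq_mem (c : Char) (hc : 'A' ≤ c ∧ c ≤ 'Z') (w : String) :
    w.toList.any (fun c' => is_english_upper_letter c' && (c'.toNat - 65 == c.toNat - 65))
      = PySem.Str.isIn (String.ofList [c]) w := by
  have h65 : 65 ≤ c.toNat := hc.1
  rw [Bool.eq_iff_iff, List.any_eq_true, PySem.Str.isIn_iff_infix]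
  constructor
  · rintro ⟨c', hm, h⟩
    simp only [Bool.and_eq_true, beq_iff_eq, is_english_upper_letter, decide_eq_true_eq] at h
    have h65' : 65 ≤ c'.toNat := h.1.1
    have hnat : c'.toNat = c.toNat := by omega
    have hcc : c' = c := Char.le_antisymm (by simpa [Char.le_def] using hnat.le)
      (by simpa [Char.le_def] using hnat.ge)
    rw [hcc] at hm
    simpa using (List.singleton_infix_iff c w.toList).mpr hm
  · intro hinf
    have hm : c ∈ w.toList := (List.singleton_infix_iff c w.toList).mp (by simpa using hinf)
    exact ⟨c, hm, by simp [is_english_upper_letter, hc.1, hc.2]⟩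

lemma check_eq_seedOk (ws : List String) (cs : List Char) :
    pvCheckSeed (ws.foldl (fun u w => w.toList.foldl
        (fun u c => if !is_english_upper_letter c then u else u.set (c.toNat - 65) true) u)
        (List.replicate 26 false)) cs
      = pvSeedOk ws cs := by
  induction cs with
  | nil => rfl
  | cons c cs ih =>
    rw [pvCheckSeed, pvSeedOk]
    by_cases hc : 'A' ≤ c ∧ c ≤ 'Z'
    · have hup : is_english_upper_letter c = true := by
        simp [is_english_upper_letter, hc.1, hc.2]
      have h65 : 65 ≤ c.toNat := hc.1
      have h90 : c.toNat ≤ 90 := hc.2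
      have hj : c.toNat - 65 < (List.replicate 26 false : List Bool).length := by
        simp; omega
      have hj' : c.toNat - 65 < 26 := by omega
      rw [marks_getD ws _ _ hj]
      rw [show (fun w => w.toList.any (fun c' => is_english_upper_letter c' && (c'.toNat - 65 == c.toNat - 65)))
            = (fun w => PySem.Str.isIn (String.ofList [c]) w) from funext (fun w => bit_eq_mem c hc w)]
      simp only [hup, decide_eq_true (show ('A' ≤ c ∧ c ≤ 'Z') from hc), Bool.not_true,
        Bool.false_eq_true, if_false, List.getD_eq_getElem?_getD, List.getElem?_replicate,
        if_pos hj', Option.getD_some, Bool.false_or, ih]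
    · have hup : is_english_upper_letter c = false := by
        simp [is_english_upper_letter]; intro h1; by_contra h2; exact hc ⟨h1, by simpa using h2⟩
      simp [hup, decide_eq_false hc]

-- ===== VERDICT (by name: the statement is the Claim_ definition above) =====
theorem are_all_seed_letters_used_spec : Claim_equal_are_all_seed_letters_used := by
  intro s ws _
  show are_all_seed_letters_used s ws = are_all_seed_letters_used_alt s ws
  unfold are_all_seed_letters_used are_all_seed_letters_used_alt
  exact check_eq_seedOk ws _
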